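-- pv_equiv track=rewrite | github.com/paregorios/unigaz | unigaz/edh.py | _edh_title
-- ===== SOURCE A (Python) =====
-- def _edh_title(entry):
--     for k in ["findspot", "findspot_modern", "findspot_ancient"]:
--         try:
--             entry[k]
--         except KeyError:
--             entry[k] = None
--     if entry["findspot_ancient"] and entry["findspot_modern"] and entry["findspot"]:
--         title = f"{entry['findspot_ancient']} - {entry['findspot_modern']} ({entry['findspot']})"
--     elif entry["findspot_ancient"] and entry["findspot_modern"]:
--         title = f"{entry['findspot_ancient']} - {entry['findspot_modern']}"
--     elif entry["findspot_ancient"] and entry["findspot"]: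
--         title = f"{entry['findspot_ancient']} ({entry['findspot']})"
--     elif entry["findspot_modern"] and entry["findspot"]:
--         title = f"{entry['findspot_modern']} ({entry['findspot']})"
--     elif entry["findspot_ancient"]:
--         title = f"{entry['findspot_ancient']}"
--     elif entry["findspot_modern"]:
--         title = f"{entry['findspot_modern']}"
--     elif entry["findspot"]:
--         title = f"{entry['findspot']}"
--     else:
--         title = None
--     return title
-- ===== SOURCE B (Python) =====
-- def _edh_title(entry):
--     for k in ("findspot", "findspot_modern", "findspot_ancient"):
--         entry.setdefault(k, None)
--     base = " - ".join(
--         x for x in (entry["findspot_ancient"], entry["findspot_modern"]) if x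
--     )
--     f = entry["findspot"]
--     if f:
--         return f"{base} ({f})" if base else f
--     return base if base else None
-- ===== Notes on version B (the rewrite author's own statement) =====
-- stated objective: simpler
-- what changed: Replaces the 8-way branch cascade over the three fields with a two-stage build: join the truthy ancient/modern fields with ' - ', then append ' (findspot)' if present, collapsing an empty result to None.
import Mathlib
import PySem

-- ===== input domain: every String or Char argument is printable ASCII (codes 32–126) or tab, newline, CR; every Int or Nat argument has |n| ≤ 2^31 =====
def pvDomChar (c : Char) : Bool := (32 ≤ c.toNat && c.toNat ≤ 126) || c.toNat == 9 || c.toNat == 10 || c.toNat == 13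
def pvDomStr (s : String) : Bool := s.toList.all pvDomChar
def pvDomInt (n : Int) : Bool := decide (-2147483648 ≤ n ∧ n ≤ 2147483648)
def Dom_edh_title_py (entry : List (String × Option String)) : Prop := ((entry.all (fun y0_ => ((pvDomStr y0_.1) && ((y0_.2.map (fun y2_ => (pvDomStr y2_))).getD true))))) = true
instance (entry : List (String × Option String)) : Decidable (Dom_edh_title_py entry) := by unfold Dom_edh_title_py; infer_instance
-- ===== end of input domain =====

-- B builds the title by joining the truthy ancient/modern fields and appending the findspot,
-- replacing A's 8-way branch cascade (simpler). Both A and B mutate entry identically (fill missing keys with None);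
-- the equivalence proved here is about the return value.

-- ===== PORT A =====
def pvLookup (entry : List (String × Option String)) (k : String) : Option String :=
  match entry.find? (fun p => p.1 == k) with
  | some p => p.2
  | none => none

def pvTruthy (v : Option String) : Bool :=
  match v with
  | some s => !(s == "")
  | none => false

-- dict key-filling loop shared textually by A and B: entry[k] = None / setdefault(k, None)
-- appends (k, none) when the key is absent (dict insertion order), leaves entry unchanged otherwise
def pvFill (entry : List (String × Option String)) (ks : List String) : List (String × Option String) :=
  ks.foldl (fun e k => if e.any (fun p => p.1 == k) then e else e ++ [(k, none)]) entry

def edh_title_py (entry : List (String × Option String)) : Option String :=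
  let e := pvFill entry ["findspot", "findspot_modern", "findspot_ancient"]
  let a := pvLookup e "findspot_ancient"
  let m := pvLookup e "findspot_modern"
  let f := pvLookup e "findspot"
  if pvTruthy a && pvTruthy m && pvTruthy f then
    some (a.getD "" ++ " - " ++ m.getD "" ++ " (" ++ f.getD "" ++ ")")
  else if pvTruthy a && pvTruthy m then
    some (a.getD "" ++ " - " ++ m.getD "")
  else if pvTruthy a && pvTruthy f then
    some (a.getD "" ++ " (" ++ f.getD "" ++ ")")
  else if pvTruthy m && pvTruthy f then
    some (m.getD "" ++ " (" ++ f.getD "" ++ ")")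
  else if pvTruthy a then some (a.getD "")
  else if pvTruthy m then some (m.getD "")
  else if pvTruthy f then some (f.getD "")
  else none

-- ===== PORT B =====
def edh_title_py_alt (entry : List (String × Option String)) : Option String :=
  let e := pvFill entry ["findspot", "findspot_modern", "findspot_ancient"]
  let base := PySem.Str.join " - "
    (([pvLookup e "findspot_ancient", pvLookup e "findspot_modern"]).filterMap
      (fun x => if pvTruthy x then some (x.getD "") else none))
  let f := pvLookup e "findspot"
  if pvTruthy f then
    (if base == "" then some (f.getD "") else some (base ++ " (" ++ f.getD "" ++ ")"))
  else (if base == "" then none else some base)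

-- ===== PRECONDITION & SPEC =====
def Spec_edh_title_py (entry : List (String × Option String)) (out : Option String) : Prop := out = edh_title_py_alt entry
instance (entry : List (String × Option String)) (out : Option String) : Decidable (Spec_edh_title_py entry out) := by unfold Spec_edh_title_py; infer_instance

-- ===== CLAIM (what is proved, stated in full; the proofs are below) =====
def Claim_equal_edh_title_py : Prop := ∀ (entry : List (String × Option String)), Dom_edh_title_py entry → Spec_edh_title_py entry (edh_title_py entry)

-- ===== LEMMAS AND PROOFS =====

lemma pv_join_nil (s : String) : PySem.Str.join s [] = "" := by
  simp [PySem.Str.join, PySem.Chars.join, List.intercalate]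

lemma pv_join_one (s x : String) : PySem.Str.join s [x] = x := by
  simp [PySem.Str.join, PySem.Chars.join, List.intercalate]

lemma pv_join_two (s x y : String) : PySem.Str.join s [x, y] = x ++ s ++ y := by
  rw [← String.toList_inj]
  simp [PySem.Str.join, PySem.Chars.join, List.intercalate]

lemma pv_core (a m f : Option String) :
    (if pvTruthy a && pvTruthy m && pvTruthy f then
      some (a.getD "" ++ " - " ++ m.getD "" ++ " (" ++ f.getD "" ++ ")")
    else if pvTruthy a && pvTruthy m then some (a.getD "" ++ " - " ++ m.getD "")
    else if pvTruthy a && pvTruthy f then some (a.getD "" ++ " (" ++ f.getD "" ++ ")")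
    else if pvTruthy m && pvTruthy f then some (m.getD "" ++ " (" ++ f.getD "" ++ ")")
    else if pvTruthy a then some (a.getD "")
    else if pvTruthy m then some (m.getD "")
    else if pvTruthy f then some (f.getD "")
    else none) =
    (let base := PySem.Str.join " - "
      (([a, m]).filterMap (fun x => if pvTruthy x then some (x.getD "") else none));
    if pvTruthy f then
      (if base == "" then some (f.getD "") else some (base ++ " (" ++ f.getD "" ++ ")"))
    else (if base == "" then none else some base)) := by
  rcases a with _ | x <;> rcases m with _ | y <;> rcases f with _ | z <;>
    (try by_cases hx : x = "") <;> (try by_cases hy : y = "") <;> (try by_cases hz : z = "") <;>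
    simp_all [pvTruthy, pv_join_nil, pv_join_one, pv_join_two, String.append_eq_empty_iff]

-- ===== VERDICT (by name: the statement is the Claim_ definition above) =====
theorem edh_title_py_spec : Claim_equal_edh_title_py := by
  intro entry _
  unfold Spec_edh_title_py edh_title_py edh_title_py_alt
  exact pv_core _ _ _
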